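-- pv_equiv track=rewrite | github.com/JarretNachtigal/python-sandbox | hackerrank_6_14_2022.py | get_consonant_substrings
-- ===== SOURCE A (Python) =====
-- def get_consonant_substrings(string):
--     consonants = ['b', 'c', 'd', 'f', 'g', 'h', 'j', 'k', 'l', 'm',
--                   'n', 'p', 'q', 'r', 's', 't', 'v', 'w', 'x', 'y', 'z']
--     substrings = []
--     length = len(string)
--     for letter in consonants:  # loop through vowels to check if they exist
--         if string.count(letter) > 0:  # if they exist
--             substrings.append(letter)  # add vowel to substrings
--             i = string.index(letter) + 1  # set i to index of vowel + 1
--             while i < length:  # add remaining substrings after the vowel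
--                 # add previous substring + next letter
--                 substrings.append(substrings[len(substrings) - 1] + string[i])
--                 i += 1
--
--     return substrings
-- ===== SOURCE B (Python) =====
-- def get_consonant_substrings(string):
--     consonants = ['b', 'c', 'd', 'f', 'g', 'h', 'j', 'k', 'l', 'm',
--                   'n', 'p', 'q', 'r', 's', 't', 'v', 'w', 'x', 'y', 'z']
--     # one pass: first-occurrence index of every character
--     first = {}
--     for i, ch in enumerate(string):
--         if ch not in first:
--             first[ch] = i
--     n = len(string)
--     out = []
--     for c in consonants:
--         if c in first:
--             p = first[c]
--             out.extend(string[p:p + k] for k in range(1, n - p + 1))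
--     return out
-- ===== Notes on version B (the rewrite author's own statement) =====
-- stated objective: alternative
-- what changed: Replaces the 21 per-consonant full-string count/index scans and the character-by-character concatenation loop with one indexing pass that records first occurrences in a dict, then emits each consonant's growing substrings directly by slicing the suffix.
import Mathlib
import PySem

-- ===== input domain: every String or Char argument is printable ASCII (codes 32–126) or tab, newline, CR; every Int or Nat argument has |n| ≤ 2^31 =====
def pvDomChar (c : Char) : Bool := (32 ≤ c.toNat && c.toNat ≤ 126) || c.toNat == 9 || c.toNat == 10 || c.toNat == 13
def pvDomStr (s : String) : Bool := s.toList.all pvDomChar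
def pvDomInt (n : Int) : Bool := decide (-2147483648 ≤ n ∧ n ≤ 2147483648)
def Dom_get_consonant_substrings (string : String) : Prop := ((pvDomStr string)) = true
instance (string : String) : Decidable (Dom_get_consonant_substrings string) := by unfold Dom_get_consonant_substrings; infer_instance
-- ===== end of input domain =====

-- B replaces A's per-consonant full-string count/index scans and its char-by-char
-- concatenation loop with one first-occurrence pass plus direct suffix slicing (objective: alternative).

-- ===== PORT A =====
-- A's inner while loop: append previous substring + string[i] while i < length
def pvALoop (cs : List Char) (length : Nat) (i : Nat) (substrings : List (List Char)) :
    List (List Char) :=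
  if i < length then
    pvALoop cs length (i + 1)
      (substrings ++ [substrings.getD (substrings.length - 1) [] ++
        [PySem.List.pyGetD cs (i : Int) default]])
  else substrings
termination_by length - i

def get_consonant_substrings (string : String) : List String :=
  let consonants : List Char := ['b','c','d','f','g','h','j','k','l','m',
                                 'n','p','q','r','s','t','v','w','x','y','z']
  let length := string.toList.length
  (consonants.foldl (fun substrings letter =>
      if PySem.Chars.count string.toList [letter] > 0 then
        pvALoop string.toList length
          ((PySem.Chars.find string.toList [letter]).toNat + 1)
          (substrings ++ [[letter]])
      else substrings) []).map String.ofList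

-- ===== PORT B =====
def get_consonant_substrings_alt (string : String) : List String :=
  let consonants : List Char := ['b','c','d','f','g','h','j','k','l','m',
                                 'n','p','q','r','s','t','v','w','x','y','z']
  let cs := string.toList
  let first : PySem.Dict Char Int :=
    (PySem.List.enumerate cs 0).foldl
      (fun d p => if d.contains p.2 then d else d.insert p.2 p.1) PySem.Dict.empty
  let n := cs.length
  consonants.foldl (fun out c =>
    match first.get? c with
    | some p => out ++ (PySem.List.pyRange 1 ((n : Int) - p + 1) 1).map
        (fun k => String.ofList (PySem.List.slice cs (some p) (some (p + k))))
    | none => out) []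

-- ===== PRECONDITION & SPEC =====
def Spec_get_consonant_substrings (string : String) (out : List String) : Prop := out = get_consonant_substrings_alt string
instance (string : String) (out : List String) : Decidable (Spec_get_consonant_substrings string out) := by unfold Spec_get_consonant_substrings; infer_instance

-- ===== CLAIM (what is proved, stated in full; the proofs are below) =====
def Claim_equal_get_consonant_substrings : Prop := ∀ (string : String), Dom_get_consonant_substrings string → Spec_get_consonant_substrings string (get_consonant_substrings string)

-- ===== LEMMAS AND PROOFS =====

-- Python's str.count with a single-character needle is the character count
theorem pvCountGo (c : Char) : ∀ (fuel : Nat) (l : List Char) (acc : Nat),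
    l.length ≤ fuel → PySem.Chars.count.go [c] fuel l acc = acc + l.count c := by
  intro fuel
  induction fuel with
  | zero =>
    intro l acc h
    have : l = [] := List.eq_nil_of_length_eq_zero (Nat.le_zero.mp h)
    subst this; simp [PySem.Chars.count.go]
  | succ n ih =>
    intro l acc h
    cases l with
    | nil => simp [PySem.Chars.count.go]
    | cons x t =>
      simp only [PySem.Chars.count.go]
      by_cases hx : c = x
      · subst hx
        simp only [List.isPrefixOf, BEq.rfl, Bool.true_and, if_true]
        rw [ih _ _ (by simpa using h)]
        simp
        omega
      · simp only [List.isPrefixOf]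
        rw [if_neg (by simp [beq_iff_eq, hx]), ih _ _ (by simpa using h)]
        simp [Ne.symm hx]

theorem pvCountEq (cs : List Char) (c : Char) :
    PySem.Chars.count cs [c] = cs.count c := by
  simp only [PySem.Chars.count, List.isEmpty_cons, if_false, Bool.false_eq_true]
  simpa using pvCountGo c cs.length cs 0 le_rfl

-- str.find of a present single character is the first-occurrence index (list.index)
theorem pvFindSingleton (cs : List Char) (c : Char) (h : c ∈ cs) :
    0 ≤ PySem.Chars.find cs [c] ∧
      PySem.List.index? cs c = some (PySem.Chars.find cs [c]).toNat := by
  have hinf : [c] <:+: cs := (List.singleton_infix_iff c cs).mpr h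
  have hn : 0 ≤ PySem.Chars.find cs [c] := (PySem.Chars.find_nonneg_iff _ _).mpr hinf
  obtain ⟨h1, h2⟩ := PySem.Chars.find_spec hn
  set j := (PySem.Chars.find cs [c]).toNat with hj
  obtain ⟨r, hr⟩ := h1
  have hjlt : j < cs.length := by
    have := congrArg List.length hr
    simp at this
    omega
  refine ⟨hn, (PySem.List.index?_eq_some_iff cs c j).mpr ⟨cs.take j, r, ?_, ?_, ?_⟩⟩
  · conv_lhs => rw [← List.take_append_drop j cs]
    rw [← hr]; simp
  · simp [hjlt.le]
  · intro hmem
    obtain ⟨i, hi, hci⟩ := List.getElem_of_mem hmem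
    have hij : i < j := by simp at hi; omega
    have hE : cs[i]'(by omega) = c := by
      simpa [List.getElem_take] using hci
    have hdrop : List.drop i cs = cs[i]'(by omega) :: List.drop (i+1) cs :=
      List.drop_eq_getElem_cons (by omega)
    exact h2 i hij ⟨List.drop (i+1) cs, by rw [List.singleton_append, hdrop, hE]⟩

-- B's first-occurrence pass: what the dict answers for any key
theorem pvFirstFold (cs : List Char) :
    ∀ (s : Int) (d : PySem.Dict Char Int) (c : Char),
      (((PySem.List.enumerate cs s).foldl
          (fun d p => if d.contains p.2 then d else d.insert p.2 p.1) d).get? c)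
        = ((d.get? c).or ((PySem.List.index? cs c).map (fun k => s + k))) := by
  induction cs with
  | nil => intro s d c; simp [PySem.List.enumerate_nil, PySem.List.index?]
  | cons x t ih =>
    intro s d c
    rw [PySem.List.enumerate_cons]
    simp only [List.foldl_cons]
    by_cases hx : x = c
    · subst hx
      by_cases hc : d.contains x
      · rw [if_pos hc, ih]
        have : (d.get? x).isSome := by rw [← PySem.Dict.contains_eq_isSome_get?, hc]
        obtain ⟨v, hv⟩ := Option.isSome_iff_exists.mp this
        simp [hv]
      · rw [if_neg hc, ih]
        have hnone : d.get? x = none := by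
          have hc' : (d.get? x).isSome ≠ true := by
            rw [← PySem.Dict.contains_eq_isSome_get?]; exact hc
          exact Option.not_isSome_iff_eq_none.mp (by simpa using hc')
        rw [PySem.List.index?_cons_self]
        simp [hnone, PySem.Dict.get?_insert_self]
    · have hstep : ∀ (d' : PySem.Dict Char Int),
          (if d'.contains x then d' else d'.insert x s).get? c = d'.get? c := by
        intro d'
        split
        · rfl
        · exact PySem.Dict.get?_insert_of_ne _ _ (Ne.symm hx)
      rw [ih, hstep, PySem.List.index?_cons_of_ne t hx]
      cases PySem.List.index? t c with
      | none => simp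
      | some k =>
        cases d.get? c with
        | some v => simp [Option.or]
        | none => simp [Option.or]; ring

-- A's inner while loop produces the growing substrings of the suffix
theorem pvALoop_eq : ∀ (fuel : Nat) (cs t : List Char) (i : Nat) (acc : List (List Char)),
    cs.length - i ≤ fuel →
    pvALoop cs cs.length i (acc ++ [t]) =
      acc ++ (List.range (cs.length - i + 1)).map (fun k => t ++ (cs.drop i).take k) := by
  intro fuel
  induction fuel with
  | zero =>
    intro cs t i acc h
    have hi : cs.length ≤ i := by omega
    rw [pvALoop, if_neg (by omega)]
    have : cs.length - i = 0 := by omega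
    rw [this]
    simp [List.drop_eq_nil_of_le hi, List.range_one]
  | succ n ih =>
    intro cs t i acc h
    by_cases hlt : i < cs.length
    · rw [pvALoop, if_pos hlt]
      have hgetD : (acc ++ [t]).getD ((acc ++ [t]).length - 1) [] = t := by
        simp [List.getD]
      have hget : PySem.List.pyGetD cs (i : Int) default = cs[i] := by
        rw [PySem.List.pyGetD_natCast]
        exact List.getD_eq_getElem cs default hlt
      rw [hgetD, hget]
      rw [ih cs (t ++ [cs[i]]) (i+1) (acc ++ [t]) (by omega)]
      have hdrop : List.drop i cs = cs[i] :: List.drop (i+1) cs :=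
        List.drop_eq_getElem_cons hlt
      have hsplit : cs.length - i + 1 = (cs.length - (i+1) + 1) + 1 := by omega
      have hmap : List.map (fun k => t ++ List.take k (List.drop i cs))
            (List.range (cs.length - i + 1))
          = t :: List.map (fun k => t ++ [cs[i]] ++ List.take k (List.drop (i+1) cs))
            (List.range (cs.length - (i+1) + 1)) := by
        rw [hsplit, List.range_succ_eq_map, List.map_cons, List.map_map]
        refine congrArg₂ List.cons (by simp) (List.map_congr_left ?_)
        intro k _
        simp only [Function.comp_def, hdrop, List.take_succ_cons, List.append_assoc,
          List.cons_append, List.nil_append, Nat.succ_eq_add_one]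
      rw [hmap]
      simp [List.append_assoc]
    · rw [pvALoop, if_neg hlt]
      have hge : cs.length ≤ i := by omega
      have : cs.length - i = 0 := by omega
      rw [this]
      simp [List.drop_eq_nil_of_le hge, List.range_one]

-- the per-consonant emitted blocks coincide (A's concatenations vs B's slices)
theorem pvBlock (cs : List Char) (c : Char) (j : Nat) (hjlt : j < cs.length)
    (hcj : cs[j] = c) :
    (List.map String.ofList
      ((List.range (cs.length - (j+1) + 1)).map (fun k => [c] ++ (cs.drop (j+1)).take k)))
    = (PySem.List.pyRange 1 ((cs.length : Int) - (j : Int) + 1) 1).map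
        (fun k => String.ofList (PySem.List.slice cs (some (j : Int)) (some ((j : Int) + k)))) := by
  rw [PySem.List.pyRange_one, List.map_map, List.map_map]
  have hlen : ((cs.length : Int) - (j : Int) + 1 - 1).toNat = cs.length - (j+1) + 1 := by
    omega
  rw [hlen]
  apply List.map_congr_left
  intro k _
  have hdrop : List.drop j cs = cs[j] :: List.drop (j+1) cs :=
    List.drop_eq_getElem_cons hjlt
  have hcast : (j : Int) + (1 + (k : Int)) = (j : Int) + ((k + 1 : Nat) : Int) := by
    push_cast; ring
  simp only [Function.comp_def, hcast, PySem.List.slice_natCast_add]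
  rw [hdrop, List.take_succ_cons, hcj]
  simp

-- main fold correspondence over any list of letters
theorem pvMainFold (cs : List Char) (L : List Char) :
    ∀ (accA : List (List Char)),
      (L.foldl (fun substrings letter =>
          if PySem.Chars.count cs [letter] > 0 then
            pvALoop cs cs.length ((PySem.Chars.find cs [letter]).toNat + 1)
              (substrings ++ [[letter]])
          else substrings) accA).map String.ofList
      = L.foldl (fun out c =>
          match ((PySem.List.enumerate cs 0).foldl
              (fun d p => if d.contains p.2 then d else d.insert p.2 p.1)
              PySem.Dict.empty).get? c with
          | some p => out ++ (PySem.List.pyRange 1 ((cs.length : Int) - p + 1) 1).map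
              (fun k => String.ofList (PySem.List.slice cs (some p) (some (p + k))))
          | none => out) (accA.map String.ofList) := by
  induction L with
  | nil => intro accA; simp
  | cons c L ih =>
    intro accA
    simp only [List.foldl_cons]
    have hget : (((PySem.List.enumerate cs 0).foldl
          (fun d p => if d.contains p.2 then d else d.insert p.2 p.1)
          PySem.Dict.empty).get? c)
        = Option.map (fun k : Nat => (k : Int)) (PySem.List.index? cs c) := by
      rw [pvFirstFold]
      simp only [PySem.Dict.get?, PySem.Dict.empty]
      cases PySem.List.index? cs c <;> simp
    by_cases hc : c ∈ cs
    · obtain ⟨hn, hidx⟩ := pvFindSingleton cs c hc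
      obtain ⟨hjlt, hcj, -⟩ := PySem.List.getElem_of_index?_eq_some hidx
      have hcount : PySem.Chars.count cs [c] > 0 := by
        rw [pvCountEq]
        exact List.count_pos_iff.mpr hc
      rw [if_pos hcount,
        pvALoop_eq cs.length cs [c] ((PySem.Chars.find cs [c]).toNat + 1) accA (by omega),
        ih, hget, hidx]
      simp only [Option.map_some]
      refine congrArg₂ _ ?_ rfl
      rw [List.map_append]
      refine congrArg₂ _ rfl ?_
      exact pvBlock cs c (PySem.Chars.find cs [c]).toNat hjlt hcj
    · have hcount : ¬ (PySem.Chars.count cs [c] > 0) := by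
        rw [pvCountEq]
        simp only [gt_iff_lt, not_lt, Nat.le_zero]
        exact List.count_eq_zero.mpr hc
      have hnone : PySem.List.index? cs c = none :=
        (PySem.List.index?_eq_none_iff cs c).mpr hc
      rw [if_neg hcount, ih]
      simp only [hget, hnone, Option.map_none]

-- ===== VERDICT (by name: the statement is the Claim_ definition above) =====
theorem get_consonant_substrings_spec : Claim_equal_get_consonant_substrings := by
  intro string _
  unfold Spec_get_consonant_substrings get_consonant_substrings get_consonant_substrings_alt
  exact pvMainFold string.toList
    ['b','c','d','f','g','h','j','k','l','m','n','p','q','r','s','t','v','w','x','y','z'] []
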